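-- pv_equiv track=rewrite | github.com/KAXPUAC/calculadora | calculadora.py | espacios
-- ===== SOURCE A (Python) =====
-- def espacios(str):
--     espacios = 0
--     anterior = ''
--     espacio = ' '
--     for x in range(len(str)):
--         if x == 0:
--             anterior = str[x]
--             continue
--         if anterior == espacio and str[x] == espacio:
--             espacios = espacios + 1
--         anterior = str[x]
--     return (espacios == 0)
-- ===== SOURCE B (Python) =====
-- def espacios(str):
--     return '  ' not in str
-- ===== Notes on version B (the rewrite author's own statement) =====
-- stated objective: idiomatic
-- what changed: Replaced the indexed scan that tracks the previous character and counts adjacent space pairs with a single double-space substring containment test.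
import Mathlib
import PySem

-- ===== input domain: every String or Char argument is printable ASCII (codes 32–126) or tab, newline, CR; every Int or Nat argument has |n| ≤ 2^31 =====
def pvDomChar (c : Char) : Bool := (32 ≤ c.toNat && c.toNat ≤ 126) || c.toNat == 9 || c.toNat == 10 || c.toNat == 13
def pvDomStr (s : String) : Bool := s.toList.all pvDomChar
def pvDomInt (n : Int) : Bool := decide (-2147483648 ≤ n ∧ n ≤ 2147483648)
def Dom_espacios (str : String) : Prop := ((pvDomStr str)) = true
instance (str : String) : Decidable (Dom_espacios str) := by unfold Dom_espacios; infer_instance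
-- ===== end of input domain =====

-- B replaces A's indexed scan with previous-character state by a single substring test '  ' not in str (idiomatic).

-- ===== PORT A =====
-- 'anterior' starts as the empty string '' and afterwards always holds a one-character
-- string; we model it as Option Char (none = ''), which compares the same against ' '.
def espacios (str : String) : Bool :=
  let cs := str.toList
  let st :=
    (PySem.List.pyRange 0 (cs.length : Int) 1).foldl
      (fun (st : Int × Option Char) (x : Int) =>
        if x = 0 then (st.1, some (PySem.List.pyGetD cs x ' '))
        else
          let c := PySem.List.pyGetD cs x ' '
          let esp := if st.2 = some ' ' ∧ c = ' ' then st.1 + 1 else st.1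
          (esp, some c))
      (0, none)
  st.1 == 0

-- ===== PORT B =====
def espacios_alt (str : String) : Bool := !(PySem.Str.isIn "  " str)

-- ===== PRECONDITION & SPEC =====
def Spec_espacios (str : String) (out : Bool) : Prop := out = espacios_alt str
instance (str : String) (out : Bool) : Decidable (Spec_espacios str out) := by unfold Spec_espacios; infer_instance

-- ===== CLAIM (what is proved, stated in full; the proofs are below) =====
def Claim_equal_espacios : Prop := ∀ (str : String), Dom_espacios str → Spec_espacios str (espacios str)

-- ===== LEMMAS AND PROOFS =====

-- number of adjacent double spaces in p :: l
def dsCount (p : Char) : List Char → Int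
  | [] => 0
  | c :: t => (if p = ' ' ∧ c = ' ' then 1 else 0) + dsCount c t

theorem dsCount_nonneg (p : Char) (l : List Char) : 0 ≤ dsCount p l := by
  induction l generalizing p with
  | nil => simp [dsCount]
  | cons c t ih => simp only [dsCount]; have := ih c; split_ifs <;> omega

theorem foldl_eq_dsCount (l : List Char) (p : Char) (n : Int) :
    (l.foldl
      (fun (st : Int × Option Char) (c : Char) =>
        ((if st.2 = some ' ' ∧ c = ' ' then st.1 + 1 else st.1), some c))
      (n, some p)).1 = n + dsCount p l := by
  induction l generalizing p n with
  | nil => simp [dsCount]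
  | cons c t ih =>
    simp only [List.foldl_cons, dsCount, ih]
    split_ifs with h h' h' <;> simp_all
    omega

theorem dsCount_eq_zero_iff (p : Char) (l : List Char) :
    dsCount p l = 0 ↔ ¬ ([' ', ' '] <:+: (p :: l)) := by
  induction l generalizing p with
  | nil =>
    simp only [dsCount, true_iff]
    intro h
    have := h.length_le
    simp at this
  | cons c t ih =>
    have hnn := dsCount_nonneg c t
    rw [List.infix_cons_iff]
    constructor
    · intro h
      simp only [dsCount] at h
      split_ifs at h with hps
      · omega
      · rw [zero_add] at h
        intro hbad
        rcases hbad with hpre | hinf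
        · rcases List.cons_prefix_cons.mp hpre with ⟨h1, h2⟩
          rcases List.cons_prefix_cons.mp h2 with ⟨h3, _⟩
          exact hps ⟨h1.symm, h3.symm⟩
        · exact (ih c).mp h hinf
    · intro h
      simp only [dsCount]
      split_ifs with hps
      · exact absurd (Or.inl (by simp [hps.1, hps.2, List.cons_prefix_cons])) h
      · rw [zero_add]
        exact (ih c).mpr (fun hinf => h (Or.inr hinf))

-- ===== VERDICT (by name: the statement is the Claim_ definition above) =====
theorem espacios_spec : Claim_equal_espacios := by
  intro str _
  unfold Spec_espacios espacios espacios_alt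
  simp only []
  rcases hcs : str.toList with _ | ⟨c, t⟩
  · rw [show ((([] : List Char).length : Int)) = 0 by simp,
        PySem.List.pyRange_one_eq_nil (by omega)]
    simp [PySem.Str.isIn_eq, hcs]
    decide
  · have hlen : (0 : Int) < ((c :: t).length : Int) := by
      simp
    rw [PySem.List.pyRange_one_cons hlen]
    have hget0 : PySem.List.pyGetD (c :: t) 0 ' ' = c := by
      simp [PySem.List.pyGetD, PySem.List.pyGet?, PySem.List.pyIdx?]
    simp only [List.foldl_cons, if_true, zero_add, hget0]
    have hcong :
        (PySem.List.pyRange 1 ((c :: t).length : Int) 1).foldl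
          (fun (st : Int × Option Char) (x : Int) =>
            if x = 0 then (st.1, some (PySem.List.pyGetD (c :: t) x ' '))
            else
              ((if st.2 = some ' ' ∧ PySem.List.pyGetD (c :: t) x ' ' = ' ' then st.1 + 1 else st.1),
                some (PySem.List.pyGetD (c :: t) x ' ')))
          ((0 : Int), some c)
        = (PySem.List.pyRange 1 ((c :: t).length : Int) 1).foldl
          (fun (st : Int × Option Char) (x : Int) =>
            ((if st.2 = some ' ' ∧ PySem.List.pyGetD (c :: t) x ' ' = ' ' then st.1 + 1 else st.1),
              some (PySem.List.pyGetD (c :: t) x ' ')))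
          ((0 : Int), some c) := by
      apply PySem.List.foldl_congr_mem
      intro st x hx
      have : (1 : Int) ≤ x := (PySem.List.mem_pyRange_one.mp hx).1
      have hx0 : x ≠ 0 := by omega
      simp [hx0]
    rw [hcong,
        show (((c :: t).length : Int)) = PySem.List.len (c :: t) from rfl,
        PySem.List.foldl_pyRange_pyGetD (a := 1) (xs := c :: t) (d := ' ')
          (f := fun (st : Int × Option Char) (ch : Char) =>
            ((if st.2 = some ' ' ∧ ch = ' ' then st.1 + 1 else st.1), some ch))
          (init := ((0 : Int), some c)) (by omega)]
    simp only [show ((1 : Int)).toNat = 1 from rfl, List.drop_one, List.tail_cons]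
    rw [foldl_eq_dsCount]
    have hz := dsCount_eq_zero_iff c t
    have hnn := dsCount_nonneg c t
    rw [PySem.Str.isIn_eq, hcs]
    by_cases hin : PySem.Chars.isIn [' ', ' '] (c :: t) = true
    · have hinf := (PySem.Chars.isIn_iff_infix _ _).mp hin
      have hne : dsCount c t ≠ 0 := fun h0 => (hz.mp h0) hinf
      simp [hin, hne]
    · have hninf : ¬ ([' ', ' '] <:+: (c :: t)) := fun hh =>
        hin ((PySem.Chars.isIn_iff_infix _ _).mpr hh)
      have h0 : dsCount c t = 0 := hz.mpr hninf
      simp [Bool.not_eq_true] at hin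
      simp [hin, h0]
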